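-- pv_equiv track=rewrite | github.com/junyeong-nero/ps | programmers/stack/110-옮기기.py | solution
-- ===== SOURCE A (Python) =====
-- def solution(s):
--     answer = []
--     for x in s:
--         stack = []
--         k = 0
--
--         # 1) remove all "110"
--         for ch in x:
--             if ch == '0' and len(stack) >= 2 and stack[-1] == '1' and stack[-2] == '1':
--                 stack.pop()
--                 stack.pop()
--                 k += 1
--             else:
--                 stack.append(ch)
--
--         rest = ''.join(stack)
--
--         # 2) insert "110"*k at the best position
--         insert = "110" * k
--         last0 = rest.rfind('0')
--
--         if last0 == -1:
--             # no '0' in rest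
--             answer.append(insert + rest)
--         else:
--             answer.append(rest[:last0 + 1] + insert + rest[last0 + 1:])
--
--     return answer
-- ===== SOURCE B (Python) =====
-- def solution(s):
--     answer = []
--     for x in s:
--         # repeatedly delete the leftmost "110"; the rewrite is confluent
--         # (occurrences never overlap), so this reaches the same normal form
--         # as a single stack pass.
--         k = 0
--         while True:
--             i = x.find('110')
--             if i == -1:
--                 break
--             x = x[:i] + x[i + 3:]
--             k += 1
--         rest = x
--         insert = "110" * k
--         last0 = rest.rfind('0')
--         if last0 == -1:
--             answer.append(insert + rest)
--         else:
--             answer.append(rest[:last0 + 1] + insert + rest[last0 + 1:])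
--     return answer
-- ===== Notes on version B (the rewrite author's own statement) =====
-- stated objective: alternative
-- what changed: Replaces the one-pass stack deletion of '110' patterns by a repeated find-leftmost-'110'-and-splice loop that rescans the string after each removal; the rewrite system is confluent (occurrences never overlap), so both reach the same normal form and removal count, and the reinsertion step is unchanged.
import Mathlib
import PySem

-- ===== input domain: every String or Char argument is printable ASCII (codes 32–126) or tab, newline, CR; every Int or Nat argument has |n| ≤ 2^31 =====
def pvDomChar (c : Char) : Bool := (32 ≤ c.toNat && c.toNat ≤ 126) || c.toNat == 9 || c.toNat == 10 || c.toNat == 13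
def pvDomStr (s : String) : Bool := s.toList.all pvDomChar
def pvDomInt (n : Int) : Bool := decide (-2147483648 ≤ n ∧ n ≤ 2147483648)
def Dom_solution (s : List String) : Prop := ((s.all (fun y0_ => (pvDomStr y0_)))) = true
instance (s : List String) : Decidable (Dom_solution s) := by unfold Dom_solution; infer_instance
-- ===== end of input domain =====

-- B replaces A's single stack pass that deletes "110" patterns by a repeated
-- leftmost-"110" find-and-splice loop (same reinsertion step); the rewrite is
-- confluent, so the results agree — objective: alternative.


-- ===== PORT A =====
-- shared reinsertion step (byte-identical in both Pythons):
-- insert = "110"*k; last0 = rest.rfind('0'); prepend if -1 else splice after last0.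
-- rfind is modeled by findIdx? on the reversed list; the in-range slices are take/drop.
def reinsert (rest : List Char) (k : Nat) : String :=
  let ins := List.flatten (List.replicate k ['1', '1', '0'])
  match rest.reverse.findIdx? (· = '0') with
  | none => String.ofList (ins ++ rest)
  | some i => String.ofList (rest.take (rest.length - i) ++ ins ++ rest.drop (rest.length - i))

-- one step of A's stack loop; the stack is kept top-first (push = cons,
-- pop = tail), the exact model of Python list append/pop at the end.
-- k is the removal count, only ever incremented from 0, modeled as Nat.
def stepA (acc : List Char × Nat) (ch : Char) : List Char × Nat :=
  if ch = '0' then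
    match acc.1 with
    | c1 :: c2 :: rest => if c1 = '1' ∧ c2 = '1' then (rest, acc.2 + 1) else (ch :: acc.1, acc.2)
    | _ => (ch :: acc.1, acc.2)
  else (ch :: acc.1, acc.2)

def solution (s : List String) : List String :=
  s.map (fun x =>
    let r := x.toList.foldl stepA ([], 0)
    reinsert r.1.reverse r.2)

-- ===== PORT B =====
-- x.find('110') followed by the splice x[:i] + x[i+3:]: returns the list with
-- the leftmost "110" removed, or none when there is no occurrence.
def remove110? : List Char → Option (List Char)
  | '1' :: '1' :: '0' :: t => some t
  | c :: t => (remove110? t).map (c :: ·)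
  | [] => none

-- termination lemma for reduceB (cited by its decreasing_by)
theorem remove110?_spec : ∀ (x y : List Char), remove110? x = some y →
    ∃ u v, x = u ++ '1' :: '1' :: '0' :: v ∧ y = u ++ v := by
  intro x
  induction x using remove110?.induct with
  | case1 t =>
    intro y h
    simp only [remove110?] at h
    exact ⟨[], t, rfl, (Option.some.inj h).symm⟩
  | case2 c t h1 ih =>
    intro y h
    rw [remove110?.eq_def] at h
    split at h
    · rename_i t' heq
      obtain ⟨rfl, rfl⟩ := List.cons.inj heq
      exact ⟨[], t', rfl, (Option.some.inj h).symm⟩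
    · rename_i heq
      obtain ⟨rfl, rfl⟩ := List.cons.inj heq
      rcases Option.map_eq_some_iff.mp h with ⟨y', hy', rfl⟩
      obtain ⟨u, v, rfl, rfl⟩ := ih y' hy'
      exact ⟨_ :: u, v, rfl, rfl⟩
    · simp at h
  | case3 => intro y h; simp [remove110?] at h

theorem remove110?_length {x y : List Char} (h : remove110? x = some y) :
    y.length + 3 = x.length := by
  obtain ⟨u, v, rfl, rfl⟩ := remove110?_spec x y h
  simp; omega

-- B's while-loop: repeatedly remove the leftmost "110", counting removals.
def reduceB (x : List Char) (k : Nat) : List Char × Nat :=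
  match h : remove110? x with
  | none => (x, k)
  | some y => reduceB y (k + 1)
termination_by x.length
decreasing_by have := remove110?_length h; omega

def solution_alt (s : List String) : List String :=
  s.map (fun x =>
    let r := reduceB x.toList 0
    reinsert r.1 r.2)

-- ===== PRECONDITION & SPEC =====
def Spec_solution (s : List String) (out : List String) : Prop := out = solution_alt s
instance (s : List String) (out : List String) : Decidable (Spec_solution s out) := by unfold Spec_solution; infer_instance

-- ===== CLAIM (what is proved, stated in full; the proofs are below) =====
def Claim_equal_solution : Prop := ∀ (s : List String), Dom_solution s → Spec_solution s (solution s)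

-- ===== LEMMAS AND PROOFS =====

-- counter shift: stepA's counter is purely additive
theorem stepA_shift (st : List Char) (k : Nat) (c : Char) :
    stepA (st, k + 1) c = ((stepA (st, k) c).1, (stepA (st, k) c).2 + 1) := by
  rcases st with _ | ⟨c1, _ | ⟨c2, r⟩⟩
  · simp [stepA]
  · simp [stepA]
  · by_cases h12 : c1 = '1' ∧ c2 = '1' <;> by_cases h0 : c = '0' <;> simp [stepA, h12, h0]

theorem foldl_stepA_shift : ∀ (l st : List Char) (k : Nat),
    l.foldl stepA (st, k + 1) = ((l.foldl stepA (st, k)).1, (l.foldl stepA (st, k)).2 + 1) := by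
  intro l
  induction l with
  | nil => intro st k; rfl
  | cons c l ih =>
    intro st k
    simp only [List.foldl_cons, stepA_shift]
    exact ih _ _

-- the three characters '1','1','0' from any state pop back to it, +1 on the counter
theorem stepA_110 (st : List Char) (k : Nat) :
    stepA (stepA (stepA (st, k) '1') '1') '0' = (st, k + 1) := by
  simp [stepA]

-- deleting one "110" occurrence changes the fold only by +1 on the counter
theorem foldl_stepA_delete : ∀ (u v : List Char) (p : List Char × Nat),
    (u ++ '1' :: '1' :: '0' :: v).foldl stepA p
      = (((u ++ v).foldl stepA p).1, ((u ++ v).foldl stepA p).2 + 1) := by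
  intro u
  induction u with
  | nil =>
    intro v p
    obtain ⟨st, k⟩ := p
    simp only [List.nil_append, List.foldl_cons, stepA_110]
    exact foldl_stepA_shift v st k
  | cons c u ih =>
    intro v p
    simp only [List.cons_append, List.foldl_cons]
    exact ih v _

-- a list containing "110" is not in normal form
theorem remove110?_occ : ∀ (u v : List Char),
    remove110? (u ++ '1' :: '1' :: '0' :: v) ≠ none := by
  intro u
  induction u with
  | nil => intro v; simp [remove110?]
  | cons c u ih =>
    intro v
    rw [remove110?.eq_def]
    split
    · simp
    · rename_i heq
      obtain ⟨rfl, rfl⟩ := List.cons.inj heq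
      simp only [List.cons_append] at *
      intro h
      exact ih v (Option.map_eq_none_iff.mp h)
    · rename_i heq
      exact absurd heq (by simp)

-- a "110"-free string passes through the stack untouched
theorem foldl_stepA_none : ∀ (x st : List Char) (k : Nat),
    remove110? (st.reverse ++ x) = none →
    x.foldl stepA (st, k) = (x.reverse ++ st, k) := by
  intro x
  induction x with
  | nil => intro st k _; simp
  | cons c x ih =>
    intro st k hno
    have hstep : stepA (st, k) c = (c :: st, k) := by
      rcases st with _ | ⟨c1, _ | ⟨c2, r⟩⟩
      · simp [stepA]
      · simp [stepA]
      · by_cases h12 : c1 = '1' ∧ c2 = '1'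
        · by_cases h0 : c = '0'
          · exfalso
            obtain ⟨rfl, rfl⟩ := h12
            subst h0
            exact remove110?_occ r.reverse x (by simpa using hno)
          · simp [stepA, h0]
        · simp [stepA, h12]
    simp only [List.foldl_cons, hstep]
    rw [ih (c :: st) k (by simpa using hno)]
    simp

theorem reduceB_none {x : List Char} {k : Nat} (h : remove110? x = none) :
    reduceB x k = (x, k) := by
  rw [reduceB]
  split
  · rfl
  · rename_i y heq; rw [h] at heq; exact absurd heq (by simp)

theorem reduceB_some {x y : List Char} {k : Nat} (h : remove110? x = some y) :
    reduceB x k = reduceB y (k + 1) := by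
  rw [reduceB]
  split
  · rename_i heq; rw [h] at heq; exact absurd heq (by simp)
  · rename_i y' heq
    rw [h] at heq
    rw [Option.some.inj heq]

theorem key : ∀ (x : List Char) (k : Nat),
    x.foldl stepA ([], k) = ((reduceB x k).1.reverse, (reduceB x k).2) := by
  intro x k
  induction x, k using reduceB.induct with
  | case1 x k h =>
    rw [reduceB_none h]
    simpa using foldl_stepA_none x [] k (by simpa using h)
  | case2 x k y h ih =>
    rw [reduceB_some h]
    obtain ⟨u, v, rfl, rfl⟩ := remove110?_spec x y h
    rw [foldl_stepA_delete, ← foldl_stepA_shift]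
    exact ih

-- ===== VERDICT (by name: the statement is the Claim_ definition above) =====
theorem solution_spec : Claim_equal_solution := by
  intro s _
  unfold Spec_solution solution solution_alt
  refine List.map_congr_left ?_
  intro x _
  have h := key x.toList 0
  simp only [h, List.reverse_reverse]
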